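-- pv_equiv track=rewrite | github.com/Arconec/MaxPython | Lesson-2-1.py | f
-- ===== SOURCE A (Python) =====
-- def f(a):
--     b = []
--     while len(a) > 1:
--         b.append(max(a) - min(a))
--         i1 = a.index(max(a))
--         a.pop(i1)
--         i1 = a.index(min(a))
--         a.pop(i1)
--     return b
-- ===== SOURCE B (Python) =====
-- # B: sort once, then peel outermost pairs (last-first) instead of rescanning for max/min each round.
-- # Return-value equivalence only: A empties its argument list in place; B leaves it untouched.
-- def f(a):
--     s = sorted(a)
--     b = []
--     while len(s) > 1:
--         b.append(s[-1] - s[0])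
--         s = s[1:-1]
--     return b
-- ===== Notes on version B (the rewrite author's own statement) =====
-- stated objective: faster
-- what changed: B sorts the list once and pairs outermost elements (last minus first, shrinking the slice), instead of A's per-round rescans for max and min with index/pop removals.
import Mathlib
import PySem

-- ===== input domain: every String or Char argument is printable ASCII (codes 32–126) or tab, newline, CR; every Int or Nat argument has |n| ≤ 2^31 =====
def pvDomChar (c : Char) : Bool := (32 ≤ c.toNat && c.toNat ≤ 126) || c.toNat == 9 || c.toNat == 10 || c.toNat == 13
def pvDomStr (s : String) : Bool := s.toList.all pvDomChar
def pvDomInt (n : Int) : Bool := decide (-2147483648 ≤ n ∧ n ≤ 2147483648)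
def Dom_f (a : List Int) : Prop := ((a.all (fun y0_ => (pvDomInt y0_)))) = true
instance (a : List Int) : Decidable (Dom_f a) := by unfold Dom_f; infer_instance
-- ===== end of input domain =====

-- B sorts once and peels outermost pairs instead of A's per-round max/min rescans; return-value
-- equivalence only: the Python A empties its argument list in place, B leaves it untouched.

-- ===== PORT A =====
-- while len(a) > 1: b.append(max(a)-min(a)); a.pop(a.index(max(a))); a.pop(a.index(min(a)))
-- fuel = initial length (each round removes two elements, so it never runs out).
def fLoopA : Nat → List Int → List Int → List Int
  | 0, _, b => b
  | fuel+1, a, b =>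
    if 1 < a.length then
      match PySem.List.max? a (fun x => x), PySem.List.min? a (fun x => x) with
      | some mx, some mn =>
        let b1 := b ++ [mx - mn]
        match PySem.List.index? a mx with
        | some i1 =>
          match PySem.List.pop? a (i1 : Int) with
          | some (_, a1) =>
            -- i1 = a.index(min(a)); a.pop(i1)   (min recomputed on the popped list)
            match PySem.List.min? a1 (fun x => x) with
            | some mn2 =>
              match PySem.List.index? a1 mn2 with
              | some i2 =>
                match PySem.List.pop? a1 (i2 : Int) with
                | some (_, a2) => fLoopA fuel a2 b1
                | none => b1
              | none => b1
            | none => b1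
          | none => b1
        | none => b1
      | _, _ => b
    else b

def f (a : List Int) : List Int := fLoopA a.length a []

-- ===== PORT B =====
-- s = sorted(a); while len(s) > 1: b.append(s[-1] - s[0]); s = s[1:-1]
def fLoopB : Nat → List Int → List Int → List Int
  | 0, _, b => b
  | fuel+1, s, b =>
    if 1 < s.length then
      fLoopB fuel (PySem.List.slice s (some 1) (some (-1)))
        (b ++ [PySem.List.pyGetD s (-1) 0 - PySem.List.pyGetD s 0 0])
    else b

def f_alt (a : List Int) : List Int :=
  fLoopB a.length (PySem.List.sorted a (fun x => x) false) []

-- ===== PRECONDITION & SPEC =====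
def Spec_f (a : List Int) (out : List Int) : Prop := out = f_alt a
instance (a : List Int) (out : List Int) : Decidable (Spec_f a out) := by unfold Spec_f; infer_instance

-- ===== CLAIM (what is proved, stated in full; the proofs are below) =====
def Claim_equal_f : Prop := ∀ (a : List Int), Dom_f a → Spec_f a (f a)

-- ===== LEMMAS AND PROOFS =====

theorem slice_one_neg_one (xs : List Int) :
    PySem.List.slice xs (some 1) (some (-1)) = xs.tail.dropLast := by
  cases xs with
  | nil => rfl
  | cons x t => simp [PySem.List.slice, List.dropLast_eq_take]

theorem getLast_eq_of_pairwise (s : List Int) (hne : s ≠ []) (hpw : s.Pairwise (fun x y => x ≤ y))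
    (mx : Int) (hmx : mx ∈ s) (hmax : ∀ y ∈ s, y ≤ mx) : s.getLast hne = mx := by
  have h1 : s.getLast hne ≤ mx := hmax _ (List.getLast_mem hne)
  have h2 : mx ≤ s.getLast hne := by
    obtain ⟨i, hi, hget⟩ := List.mem_iff_getElem.mp hmx
    rw [List.getLast_eq_getElem]
    rcases Nat.lt_or_ge i (s.length - 1) with hlt | hge
    · have := List.pairwise_iff_getElem.mp hpw i (s.length - 1) hi (by omega) hlt
      omega
    · have : i = s.length - 1 := by omega
      subst this; rw [hget]
  omega

theorem erase_max_perm_dropLast (s : List Int) (hne : s ≠ []) (mx : Int)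
    (hlast : s.getLast hne = mx) : (s.erase mx).Perm s.dropLast := by
  have hdecomp : s = s.dropLast ++ [mx] := by
    rw [← hlast]; exact (List.dropLast_append_getLast hne).symm
  by_cases hm : mx ∈ s.dropLast
  · have h1 : s.erase mx = s.dropLast.erase mx ++ [mx] := by
      conv_lhs => rw [hdecomp]
      exact List.erase_append_left _ hm
    rw [h1]
    exact (List.perm_append_comm).trans (List.perm_cons_erase hm).symm
  · have h1 : s.erase mx = s.dropLast ++ ([mx].erase mx) := by
      conv_lhs => rw [hdecomp]
      exact List.erase_append_right _ hm
    rw [h1]; simp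

-- popping the first occurrence of a member = List.erase
theorem pop_index_eq_erase (xs : List Int) (v : Int) (i : Nat)
    (h : PySem.List.index? xs v = some i) :
    ∃ hlt : i < xs.length, PySem.List.pop? xs (i : Int) = some (xs[i], xs.erase v) := by
  obtain ⟨hlt, hget, _⟩ := PySem.List.getElem_of_index?_eq_some h
  refine ⟨hlt, ?_⟩
  rw [PySem.List.pop?_natCast xs i hlt]
  have herase : xs.erase v = xs.eraseIdx i := by
    rw [List.erase_eq_eraseIdx]
    rw [PySem.List.index?_eq_idxOf?] at h
    rw [h]
  rw [herase]

theorem main_eq : ∀ (fuel : Nat) (a b : List Int),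
    fLoopA fuel a b = fLoopB fuel (PySem.List.sorted a (fun x => x) false) b := by
  intro fuel
  induction fuel with
  | zero => intro a b; rfl
  | succ fuel ih =>
    intro a b
    rw [fLoopA, fLoopB, PySem.List.length_sorted]
    by_cases h : 1 < a.length
    · simp only [h, if_true]
      -- a is nonempty: max?/min? exist
      have hane : a ≠ [] := by intro hnil; rw [hnil] at h; simp at h
      obtain ⟨mx, hmx⟩ : ∃ mx, PySem.List.max? a (fun x => x) = some mx := by
        cases hcase : PySem.List.max? a (fun x => x) with
        | none => exact absurd ((PySem.List.max?_eq_none_iff a _).mp hcase) hane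
        | some m => exact ⟨m, rfl⟩
      obtain ⟨mn, hmn⟩ : ∃ mn, PySem.List.min? a (fun x => x) = some mn := by
        cases hcase : PySem.List.min? a (fun x => x) with
        | none => exact absurd ((PySem.List.min?_eq_none_iff a _).mp hcase) hane
        | some m => exact ⟨m, rfl⟩
      -- facts about mx mn
      have hmxa : mx ∈ a := PySem.List.max?_mem hmx
      have hmna : mn ∈ a := PySem.List.min?_mem hmn
      have hmaxf : ∀ y ∈ a, y ≤ mx := fun y hy => PySem.List.max?_isMax hmx y hy
      have hminf : ∀ y ∈ a, mn ≤ y := fun y hy => PySem.List.min?_isMin hmn y hy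
      -- first pop
      obtain ⟨i1, hi1⟩ : ∃ i1, PySem.List.index? a mx = some i1 := by
        cases hcase : PySem.List.index? a mx with
        | none => exact absurd ((PySem.List.index?_eq_none_iff a mx).mp hcase) (by simp [hmxa])
        | some i => exact ⟨i, rfl⟩
      obtain ⟨hlt1, hpop1⟩ := pop_index_eq_erase a mx i1 hi1
      set a1 := a.erase mx with ha1
      have hlen1 : a1.length = a.length - 1 := List.length_erase_of_mem hmxa
      have ha1ne : a1 ≠ [] := by
        intro hnil
        rw [hnil] at hlen1; simp at hlen1; omega
      have ha1sub : ∀ y ∈ a1, y ∈ a := fun y hy => List.mem_of_mem_erase hy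
      -- min of a1 is mn
      obtain ⟨mn2, hmn2⟩ : ∃ m, PySem.List.min? a1 (fun x => x) = some m := by
        cases hcase : PySem.List.min? a1 (fun x => x) with
        | none => exact absurd ((PySem.List.min?_eq_none_iff a1 _).mp hcase) ha1ne
        | some m => exact ⟨m, rfl⟩
      have hmn2a : mn2 ∈ a1 := PySem.List.min?_mem hmn2
      have hmn2_eq : mn2 = mn := by
        have h1 : mn ≤ mn2 := hminf _ (ha1sub _ hmn2a)
        have h2 : mn2 ≤ mn := by
          by_cases hcase : mn = mx
          · have := hmaxf _ (ha1sub _ hmn2a); omega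
          · exact PySem.List.min?_isMin hmn2 mn (List.mem_erase_of_ne hcase |>.mpr hmna)
        omega
      -- second pop
      obtain ⟨i2, hi2⟩ : ∃ i2, PySem.List.index? a1 mn2 = some i2 := by
        cases hcase : PySem.List.index? a1 mn2 with
        | none => exact absurd ((PySem.List.index?_eq_none_iff a1 mn2).mp hcase) (by simp [hmn2a])
        | some i => exact ⟨i, rfl⟩
      obtain ⟨hlt2, hpop2⟩ := pop_index_eq_erase a1 mn2 i2 hi2
      -- sorted facts
      set s := PySem.List.sorted a (fun x => x) false with hs
      have hsne : s ≠ [] := by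
        intro hnil
        have := PySem.List.length_sorted a (fun x => x) false
        rw [hs] at hnil
        rw [hnil] at this; simp at this; omega
      have hsperm : s.Perm a := PySem.List.sorted_perm a _ _
      have hspw : s.Pairwise (fun x y => x ≤ y) := PySem.List.sorted_pairwise a (fun x => x)
      have hslast : s.getLast hsne = mx :=
        getLast_eq_of_pairwise s hsne hspw mx (hsperm.mem_iff.mpr hmxa)
          (fun y hy => hmaxf y (hsperm.mem_iff.mp hy))
      -- s = mn :: t with t ≠ []
      obtain ⟨hd, t, hst⟩ := List.exists_cons_of_ne_nil hsne
      have hhd : hd = mn := by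
        have h1 : ∀ y ∈ s, hd ≤ y := by
          intro y hy
          rw [hst] at hy
          rcases List.mem_cons.mp hy with rfl | hyt
          · omega
          · have : List.Pairwise (fun x y => x ≤ y) (hd :: t) := by rw [← hst]; exact hspw
            exact (List.pairwise_cons.mp this).1 y hyt
        have h2 := h1 mn (hsperm.mem_iff.mpr hmna)
        have h3 : hd ∈ a := hsperm.mem_iff.mp (by rw [hst]; exact List.mem_cons_self)
        have h4 := hminf hd h3
        omega
      have htne : t ≠ [] := by
        intro hnil
        have := PySem.List.length_sorted a (fun x => x) false
        rw [← hs] at this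
        rw [hst, hnil] at this; simp at this; omega
      -- pyGetD values
      have hget_last : PySem.List.pyGetD s (-1) 0 = mx := by
        rw [PySem.List.pyGetD_neg_one s 0 hsne]; exact hslast
      have hget_head : PySem.List.pyGetD s 0 0 = mn := by
        rw [hst, ← hhd]; exact PySem.List.pyGetD_zero_cons hd t 0
      -- the new sorted list
      have hkey : PySem.List.sorted ((a1.erase mn2)) (fun x => x) false = s.tail.dropLast := by
        apply PySem.List.sorted_id_eq_of_perm_of_pairwise
        · -- (s.tail.dropLast).Perm (a1.erase mn2)
          have p1 : (s.erase mx).Perm s.dropLast := erase_max_perm_dropLast s hsne mx hslast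
          have p2 : (a1.erase mn2).Perm ((s.erase mx).erase mn2) := by
            rw [ha1]
            exact (hsperm.erase mx).symm.erase mn2
          have p3 : ((s.erase mx).erase mn2).Perm (s.dropLast.erase mn2) := p1.erase mn2
          have hdropLast : s.dropLast = mn :: t.dropLast := by
            rw [hst, List.dropLast_cons_of_ne_nil htne, hhd]
          have p4 : s.dropLast.erase mn2 = t.dropLast := by
            rw [hdropLast, hmn2_eq]; simp
          have p5 : s.tail.dropLast = t.dropLast := by rw [hst]; rfl
          rw [p5, ← p4]
          exact (p2.trans p3).symm
        · -- pairwise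
          have hpwt : t.Pairwise (fun x y => x ≤ y) := by
            have h' := hspw
            rw [hst] at h'
            exact (List.pairwise_cons.mp h').2
          have h'' : s.tail.Pairwise (fun x y => x ≤ y) := by
            rw [hst]; simpa using hpwt
          exact h''.sublist (List.dropLast_sublist _)
      rw [slice_one_neg_one, ← hkey, hmx, hmn]
      simp only [hi1, hpop1, hmn2, hi2, hpop2, hget_last, hget_head]
      exact ih (a1.erase mn2) (b ++ [mx - mn])
    · simp [h]

-- ===== VERDICT (by name: the statement is the Claim_ definition above) =====
theorem f_spec : Claim_equal_f := by
  intro a _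
  unfold Spec_f f f_alt
  rw [main_eq]
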